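-- pv_equiv track=rewrite | github.com/jonathanyulan99/SDE-Fundamentals | ALL/Formation/Set_Drills/match_fellows_by_skill_rating.py | canMatchFellows
-- ===== SOURCE A (Python) =====
-- def canMatchFellows(skillMap: dict) -> bool:
--     if not skillMap:
--         return True
--
--     skill_dict = {}
--     for key, values in skillMap.items():
--         if values not in skill_dict:
--             skill_dict[values] = 1
--         else:
--             skill_dict[values] += 1
--
--     for values in skill_dict.values():
--         if values < 2:
--             return False
--         elif values % 2 != 0:
--             return False
--
--     return True
-- ===== SOURCE B (Python) =====
-- def canMatchFellows(skillMap: dict) -> bool: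
--     odd = set()
--     for v in skillMap.values():
--         odd ^= {v}
--     return not odd
-- ===== Notes on version B (the rewrite author's own statement) =====
-- stated objective: idiomatic
-- what changed: Replaces the frequency-dict build plus a second validation loop (count<2 and parity branches) with a single pass maintaining the set of values seen an odd number of times via a symmetric-difference toggle, returning whether that set is empty (the count<2 check is redundant given evenness).
import Mathlib
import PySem

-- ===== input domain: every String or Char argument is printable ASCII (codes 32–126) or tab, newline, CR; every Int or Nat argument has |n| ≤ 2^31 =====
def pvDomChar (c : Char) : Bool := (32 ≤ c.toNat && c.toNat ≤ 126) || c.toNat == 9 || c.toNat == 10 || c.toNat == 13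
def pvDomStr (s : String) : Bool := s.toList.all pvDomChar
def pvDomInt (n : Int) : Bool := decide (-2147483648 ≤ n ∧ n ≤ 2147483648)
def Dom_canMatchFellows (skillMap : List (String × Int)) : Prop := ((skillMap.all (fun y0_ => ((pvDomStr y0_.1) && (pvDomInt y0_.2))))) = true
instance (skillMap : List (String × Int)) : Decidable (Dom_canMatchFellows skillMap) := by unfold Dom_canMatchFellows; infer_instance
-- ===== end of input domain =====

-- B replaces A's frequency-dict build plus second validation loop with a single-pass
-- parity toggle of a set of odd-count values (idiomatic; same O(n) cost).

-- ===== PORT A =====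
-- A's second loop: for values in skill_dict.values(): if values < 2 … elif values % 2 != 0 …
def cmfCheck : List Int → Bool
  | [] => true
  | v :: rest =>
    if v < 2 then false
    else if PySem.Int.mod v 2 ≠ 0 then false
    else cmfCheck rest

def canMatchFellows (skillMap : List (String × Int)) : Bool :=
  if skillMap = [] then true
  else
    let skill_dict : PySem.Dict Int Int :=
      skillMap.foldl (fun d kv =>
        if d.contains kv.2 = false then d.insert kv.2 1
        else d.modify kv.2 0 (· + 1)) PySem.Dict.empty
    cmfCheck skill_dict.values

-- ===== PORT B =====
def canMatchFellows_alt (skillMap : List (String × Int)) : Bool :=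
  (skillMap.foldl (fun odd kv => PySem.Set.symmDiff odd (PySem.Set.ofList [kv.2]))
    (PySem.Set.empty : PySem.Set Int)).isEmpty

-- ===== PRECONDITION & SPEC =====
def Spec_canMatchFellows (skillMap : List (String × Int)) (out : Bool) : Prop := out = canMatchFellows_alt skillMap
instance (skillMap : List (String × Int)) (out : Bool) : Decidable (Spec_canMatchFellows skillMap out) := by unfold Spec_canMatchFellows; infer_instance

-- ===== CLAIM (what is proved, stated in full; the proofs are below) =====
def Claim_equal_canMatchFellows : Prop := ∀ (skillMap : List (String × Int)), Dom_canMatchFellows skillMap → Spec_canMatchFellows skillMap (canMatchFellows skillMap)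

-- ===== LEMMAS AND PROOFS =====

-- A's dict-building loop is the values counter
theorem cmf_fold_eq_counter (skillMap : List (String × Int)) :
    skillMap.foldl (fun d kv =>
        if d.contains kv.2 = false then d.insert kv.2 1
        else d.modify kv.2 0 (· + 1)) (PySem.Dict.empty : PySem.Dict Int Int)
      = PySem.Dict.counter (skillMap.map (·.2)) := by
  have hstep : (fun (d : PySem.Dict Int Int) (kv : String × Int) =>
      if d.contains kv.2 = false then d.insert kv.2 1
      else d.modify kv.2 0 (· + 1))
      = fun d kv => d.insert kv.2 (d.getD kv.2 0 + 1) := by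
    funext d kv
    by_cases h : d.contains kv.2 = false
    · rw [if_pos h, PySem.Dict.getD_of_not_contains _ _ h]; norm_num
    · rw [if_neg h]; simp [PySem.Dict.modify, PySem.Dict.getD_eq_get?_getD]
  rw [hstep,
    show List.foldl (fun (d : PySem.Dict Int Int) (kv : String × Int) =>
        d.insert kv.2 (d.getD kv.2 0 + 1)) PySem.Dict.empty skillMap
      = List.foldl (fun d v => d.insert v (d.getD v 0 + 1)) PySem.Dict.empty
          (skillMap.map (·.2)) from
        (List.foldl_map (f := fun kv : String × Int => kv.2)
          (g := fun (d : PySem.Dict Int Int) v => d.insert v (d.getD v 0 + 1))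
          (l := skillMap) (init := PySem.Dict.empty)).symm,
    PySem.Dict.foldl_insert_getD_add_one_eq_counter]

theorem cmfCheck_eq_all (l : List Int) :
    cmfCheck l = l.all (fun v => !decide (v < 2) && !decide (PySem.Int.mod v 2 ≠ 0)) := by
  induction l with
  | nil => rfl
  | cons v rest ih =>
    simp only [cmfCheck, List.all_cons, ih]
    by_cases h1 : v < 2 <;> simp [h1]

-- A's verdict on a nonempty list: every value's multiplicity is even
-- (the `< 2` branch is subsumed: a present value has count ≥ 1, and an even count ≥ 1 is ≥ 2)
theorem cmf_A_char (vals : List Int) :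
    cmfCheck ((PySem.Dict.counter vals).values) = true ↔ ∀ v ∈ vals, vals.count v % 2 = 0 := by
  have hvals : (PySem.Dict.counter vals).values
      = (PySem.Set.ofList vals).map (fun k => (vals.count k : Int)) := by
    show ((PySem.Dict.counter vals).items).map (·.2) = _
    rw [PySem.Dict.items_counter, List.map_map]; rfl
  rw [hvals, cmfCheck_eq_all]
  simp only [List.all_map, List.all_eq_true, Function.comp]
  constructor
  · intro h v hv
    have h2 := h v (by rw [PySem.Set.mem_ofList]; exact hv)
    have hm : PySem.Int.mod ((vals.count v : Nat) : Int) 2 = ((vals.count v % 2 : Nat) : Int) := by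
      exact_mod_cast PySem.Int.mod_natCast (vals.count v) 2
    rw [Bool.and_eq_true, Bool.not_eq_true', Bool.not_eq_true', decide_eq_false_iff_not,
      decide_eq_false_iff_not, not_not, hm] at h2
    exact_mod_cast h2.2
  · intro h k hk'
    have hk : k ∈ vals := (PySem.Set.mem_ofList vals k).mp hk'
    have hcnt : 0 < vals.count k := List.count_pos_iff.mpr hk
    have he := h k hk
    have hm : PySem.Int.mod ((vals.count k : Nat) : Int) 2 = ((vals.count k % 2 : Nat) : Int) := by
      exact_mod_cast PySem.Int.mod_natCast (vals.count k) 2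
    rw [Bool.and_eq_true, Bool.not_eq_true', Bool.not_eq_true', decide_eq_false_iff_not,
      decide_eq_false_iff_not, not_not, hm]
    constructor
    · omega
    · exact_mod_cast he

-- B's toggle loop: membership in the accumulator tracks parity of the count
theorem toggle_mem (l : List Int) : ∀ (s : PySem.Set Int), s.Nodup → ∀ v : Int,
    (v ∈ l.foldl (fun odd x => PySem.Set.symmDiff odd (PySem.Set.ofList [x])) s
      ↔ ((v ∈ s) ↔ l.count v % 2 = 0)) := by
  induction l with
  | nil => intro s _ v; simp
  | cons x rest ih =>
    intro s hs v
    rw [List.foldl_cons,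
      ih _ (PySem.Set.nodup_symmDiff _ _ hs (PySem.Set.nodup_ofList [x])),
      PySem.Set.mem_symmDiff]
    have hx : v ∈ PySem.Set.ofList [x] ↔ v = x := by
      rw [PySem.Set.mem_ofList]; simp
    by_cases hvx : v = x
    · subst hvx
      by_cases hv : v ∈ s <;> simp [hv, hx] <;> omega
    · simp [hx, hvx, Ne.symm hvx]

theorem cmf_B_char (skillMap : List (String × Int)) :
    canMatchFellows_alt skillMap = true
      ↔ ∀ v ∈ skillMap.map (·.2), (skillMap.map (·.2)).count v % 2 = 0 := by
  unfold canMatchFellows_alt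
  rw [show List.foldl (fun odd (kv : String × Int) =>
        PySem.Set.symmDiff odd (PySem.Set.ofList [kv.2])) PySem.Set.empty skillMap
      = List.foldl (fun odd x => PySem.Set.symmDiff odd (PySem.Set.ofList [x]))
          PySem.Set.empty (skillMap.map (·.2)) from
        (List.foldl_map (f := fun kv : String × Int => kv.2)
          (g := fun (odd : PySem.Set Int) x => PySem.Set.symmDiff odd (PySem.Set.ofList [x]))
          (l := skillMap) (init := PySem.Set.empty)).symm]
  rw [List.isEmpty_iff, List.eq_nil_iff_forall_not_mem]
  constructor
  · intro h v _
    have hv := h v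
    rw [toggle_mem _ PySem.Set.empty List.nodup_nil v] at hv
    simpa [PySem.Set.empty] using hv
  · intro h v
    rw [toggle_mem _ PySem.Set.empty List.nodup_nil v]
    by_cases hv : v ∈ skillMap.map (·.2)
    · simpa [PySem.Set.empty] using h v hv
    · simp [PySem.Set.empty, List.count_eq_zero_of_not_mem hv]

-- ===== VERDICT (by name: the statement is the Claim_ definition above) =====
theorem canMatchFellows_spec : Claim_equal_canMatchFellows := by
  intro skillMap _
  unfold Spec_canMatchFellows
  by_cases hnil : skillMap = []
  · subst hnil; rfl
  · rw [Bool.eq_iff_iff, cmf_B_char]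
    simp only [canMatchFellows, if_neg hnil]
    rw [cmf_fold_eq_counter, cmf_A_char]
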